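-- pv_equiv track=rewrite | github.com/romanripari/Desafios | 00-Initiation/03-nearest-value.py | nearest_value
-- ===== SOURCE A (Python) =====
-- def nearest_value(values: set, one: int) -> int:
--     res = max(values)
--     distance = abs(res-one)
--     for v in values:
--         if (abs(v-one) < distance) or ( abs(v-one) == distance and v < res):
--             res = v
--             distance = abs(v-one)
--
--     return res
-- ===== SOURCE B (Python) =====
-- def nearest_value(values: set, one: int) -> int:
--     d = min(abs(v - one) for v in values)
--     return min(v for v in values if abs(v - one) == d)
-- ===== Notes on version B (the rewrite author's own statement) =====
-- stated objective: alternative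
-- what changed: Replaces the single fold that tracks a running best value and its distance (seeded from max(values)) by two plain min-scans: first the minimum distance, then the smallest value attaining it.
import Mathlib
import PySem

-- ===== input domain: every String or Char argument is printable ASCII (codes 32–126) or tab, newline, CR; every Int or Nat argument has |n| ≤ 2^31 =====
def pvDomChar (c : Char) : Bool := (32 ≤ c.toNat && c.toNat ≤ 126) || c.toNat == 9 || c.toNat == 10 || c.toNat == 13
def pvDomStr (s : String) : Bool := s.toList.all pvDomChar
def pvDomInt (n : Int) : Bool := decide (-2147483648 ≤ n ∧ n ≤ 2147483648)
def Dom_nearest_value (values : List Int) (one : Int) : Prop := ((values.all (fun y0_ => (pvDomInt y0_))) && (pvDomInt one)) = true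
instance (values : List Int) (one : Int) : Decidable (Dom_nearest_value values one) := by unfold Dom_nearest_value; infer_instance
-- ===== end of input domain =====

-- B replaces A's single running-best fold (seeded from max) by two min-scans: the minimum
-- distance first, then the smallest value at that distance; same O(n) cost, different shape.


-- ===== PORT A =====
def nearest_value (values : List Int) (one : Int) : Int :=
  match PySem.List.max? values (fun v => v) with
  | none => 0  -- max([]) raises ValueError; excluded by Pre_
  | some res0 =>
    (values.foldl
      (fun (st : Int × Int) v =>
        if |v - one| < st.2 ∨ (|v - one| = st.2 ∧ v < st.1) then (v, |v - one|) else st)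
      (res0, |res0 - one|)).1

-- ===== PORT B =====
def nearest_value_alt (values : List Int) (one : Int) : Int :=
  match PySem.List.min? (values.map (fun v => |v - one|)) (fun x => x) with
  | none => 0  -- min over an empty generator raises ValueError; excluded by Pre_
  | some d =>
    match PySem.List.min? (values.filter (fun v => |v - one| == d)) (fun x => x) with
    | none => 0  -- unreachable: some value attains the minimum distance
    | some m => m

-- ===== PRECONDITION & SPEC =====
-- Pre_ excludes only the empty list, on which both Pythons raise ValueError (max/min of empty).
def Pre_nearest_value (values : List Int) (one : Int) : Prop := values ≠ []
instance (values : List Int) (one : Int) : Decidable (Pre_nearest_value values one) := by unfold Pre_nearest_value; infer_instance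
def pvWitness_nearest_value : List Int × Int := ([4, 7], 5)
def Spec_nearest_value (values : List Int) (one : Int) (out : Int) : Prop := out = nearest_value_alt values one
instance (values : List Int) (one : Int) (out : Int) : Decidable (Spec_nearest_value values one out) := by unfold Spec_nearest_value; infer_instance

-- ===== CLAIM (what is proved, stated in full; the proofs are below) =====
def Claim_equal_nearest_value : Prop := ∀ (values : List Int) (one : Int), Dom_nearest_value values one → Pre_nearest_value values one → Spec_nearest_value values one (nearest_value values one)

-- ===== LEMMAS AND PROOFS =====

-- the lex order "closer to one, ties broken by smaller value"
def pvLe (one x y : Int) : Prop := |x - one| < |y - one| ∨ (|x - one| = |y - one| ∧ x ≤ y)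

-- the value component of A's loop step
def pvG (one r v : Int) : Int :=
  if |v - one| < |r - one| ∨ (|v - one| = |r - one| ∧ v < r) then v else r

theorem pvLe_refl (one x : Int) : pvLe one x x := Or.inr ⟨rfl, le_refl x⟩

theorem pvLe_trans {one x y z : Int} (h1 : pvLe one x y) (h2 : pvLe one y z) : pvLe one x z := by
  unfold pvLe at *; omega

theorem pvG_le_left (one r v : Int) : pvLe one (pvG one r v) r := by
  unfold pvG pvLe; split_ifs with h
  · omega
  · exact pvLe_refl one r

theorem pvG_le_right (one r v : Int) : pvLe one (pvG one r v) v := by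
  unfold pvG pvLe; split_ifs with h
  · exact Or.inr ⟨rfl, le_refl v⟩
  · omega

theorem pvG_mem (one r v : Int) : pvG one r v = r ∨ pvG one r v = v := by
  unfold pvG; split_ifs <;> simp

-- A's fold over (res, distance) pairs tracks exactly (foldl pvG, its distance)
theorem fold_pair (one : Int) (l : List Int) (r : Int) :
    l.foldl
      (fun (st : Int × Int) v =>
        if |v - one| < st.2 ∨ (|v - one| = st.2 ∧ v < st.1) then (v, |v - one|) else st)
      (r, |r - one|) = (l.foldl (pvG one) r, |l.foldl (pvG one) r - one|) := by
  induction l generalizing r with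
  | nil => rfl
  | cons v t ih =>
    simp only [List.foldl]
    have hstep : (if |v - one| < |r - one| ∨ (|v - one| = |r - one| ∧ v < r)
        then (v, |v - one|) else (r, |r - one|)) = (pvG one r v, |pvG one r v - one|) := by
      unfold pvG; split_ifs <;> rfl
    rw [hstep, ih]

theorem fold_g_mem (one : Int) (l : List Int) (r : Int) :
    l.foldl (pvG one) r = r ∨ l.foldl (pvG one) r ∈ l := by
  induction l generalizing r with
  | nil => simp
  | cons v t ih =>
    simp only [List.foldl]
    rcases ih (pvG one r v) with h | h
    · rcases pvG_mem one r v with h2 | h2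
      · exact Or.inl (h.trans h2)
      · refine Or.inr ?_
        rw [h.trans h2]
        exact List.mem_cons_self
    · exact Or.inr (List.mem_cons_of_mem _ h)

theorem fold_g_min (one : Int) (l : List Int) (r : Int) :
    pvLe one (l.foldl (pvG one) r) r ∧ ∀ y ∈ l, pvLe one (l.foldl (pvG one) r) y := by
  induction l generalizing r with
  | nil => exact ⟨pvLe_refl one r, by simp⟩
  | cons v t ih =>
    simp only [List.foldl]
    obtain ⟨h1, h2⟩ := ih (pvG one r v)
    refine ⟨pvLe_trans h1 (pvG_le_left one r v), ?_⟩
    intro y hy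
    rcases List.mem_cons.mp hy with h | hy
    · rw [h]; exact pvLe_trans h1 (pvG_le_right one r v)
    · exact h2 y hy

theorem nearest_value_spec : Claim_equal_nearest_value := by
  intro values one _ hpre
  unfold Spec_nearest_value nearest_value nearest_value_alt
  -- A side: max exists
  cases hm : PySem.List.max? values (fun v => v) with
  | none => exact absurd ((PySem.List.max?_eq_none_iff _ _).mp hm) hpre
  | some m =>
  simp only [fold_pair]
  set x := values.foldl (pvG one) m with hx
  have hmmem : m ∈ values := PySem.List.max?_mem hm
  have hxmem : x ∈ values := by
    rcases fold_g_mem one values m with h | h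
    · rw [hx, h]; exact hmmem
    · exact h
  have hxmin : ∀ y ∈ values, pvLe one x y := (fold_g_min one values m).2
  -- B side: min distance exists
  cases hd : PySem.List.min? (values.map (fun v => |v - one|)) (fun x => x) with
  | none =>
    have h0 := (PySem.List.min?_eq_none_iff _ _).mp hd
    simp only [List.map_eq_nil_iff] at h0
    exact absurd h0 hpre
  | some d =>
  show x = match PySem.List.min? (values.filter (fun v => |v - one| == d)) (fun x => x) with
    | none => 0
    | some m => m
  have hdmem : d ∈ values.map (fun v => |v - one|) := PySem.List.min?_mem hd
  have hdmin : ∀ y ∈ values.map (fun v => |v - one|), d ≤ y := by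
    intro y hy; exact PySem.List.min?_isMin hd y hy
  obtain ⟨w, hw, hwd⟩ := List.mem_map.mp hdmem
  -- x attains the minimum distance d
  have hxd : |x - one| = d := by
    have h1 : d ≤ |x - one| := hdmin _ (List.mem_map.mpr ⟨x, hxmem, rfl⟩)
    have h2 : pvLe one x w := hxmin w hw
    unfold pvLe at h2; omega
  have hxfil : x ∈ values.filter (fun v => |v - one| == d) := by
    simp [List.mem_filter, hxmem, hxd]
  cases hm2 : PySem.List.min? (values.filter (fun v => |v - one| == d)) (fun x => x) with
  | none =>
    have h0 := (PySem.List.min?_eq_none_iff _ _).mp hm2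
    rw [h0] at hxfil; simp at hxfil
  | some m2 =>
  show x = m2
  have hm2mem := PySem.List.min?_mem hm2
  have hm2d : |m2 - one| = d := by
    have := (List.mem_filter.mp hm2mem).2; simpa using this
  have hm2v : m2 ∈ values := (List.mem_filter.mp hm2mem).1
  have hle : m2 ≤ x := PySem.List.min?_isMin hm2 x hxfil
  have hge : pvLe one x m2 := hxmin m2 hm2v
  unfold pvLe at hge; omega
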